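-- pv_equiv track=rewrite | github.com/WallerTsai/OJ-Solution | leetcode-py/动态规划/其他线性DP/多维DP/No3725.py | countCoprime
-- ===== SOURCE A (Python) =====
-- from typing import List
--
-- def countCoprime(mat: List[List[int]]) -> int:
--     MOD = 1_000_000_007
--     mx = max(map(max, mat))  # 找到矩阵中的最大值，用于确定计算范围
--
--     # cnt_gcd[i] 将存储最大公约数恰好为 i 的方案数
--     cnt_gcd = [0] * (mx + 1)
--
--     # 从大到小枚举所有可能的 gcd 值
--     # 原因：我们需要使用容斥原理，较大的 gcd 值会先计算
--     for i in range(mx, 0, -1):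
--         # ============================================
--         # 步骤1: 计算所有选择的数都是 i 的倍数的方案数
--         # ============================================
--         # 这个 res 实际上是 f(i)，即 gcd 是 i 的倍数的方案数
--         # 每行选一个 i 的倍数的方案数
--         res = 1
--         for row in mat:
--             cnt = 0  # 统计当前行中 i 的倍数的个数
--             for x in row:
--                 if x % i == 0:  # x 是 i 的倍数
--                     cnt += 1
--             if cnt == 0:  # 如果某一行没有 i 的倍数
--                 res = 0   # 那么无法从每行都选到 i 的倍数
--                 break
--             # 乘法原理：每行的选择数相乘
--             res = res * cnt % MOD
--
--         # ============================================
--         # 步骤2: 容斥原理，得到 gcd 恰好为 i 的方案数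
--         # ============================================
--         # 此时 res = f(i) = gcd 是 i 的倍数的方案数
--         # 我们需要减去那些 gcd 是 i 的倍数但大于 i 的方案
--         # 也就是减去 gcd 为 2i, 3i, 4i... 的方案数
--         for j in range(i, mx + 1, i):  # 遍历所有 i 的倍数
--             # 减去已经计算过的 gcd 为 j 的方案数
--             # 当 j = i 时，cnt_gcd[j] 还是 0（因为从大到小计算）
--             # 实际减去的是 j = 2i, 3i, 4i... 的情况
--             res -= cnt_gcd[j]
--
--         # 存储 gcd 恰好为 i 的方案数
--         cnt_gcd[i] = res % MOD
--
--     # cnt_gcd[1] 就是最大公约数恰好为 1 的方案数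
--     return cnt_gcd[1]   # 335ms
-- ===== SOURCE B (Python) =====
-- from typing import List
--
-- # Same inclusion-exclusion over gcd values, but the number of multiples of i in a
-- # row is obtained from a per-row frequency table of absolute values summed
-- # sieve-style over the multiples of i (mx/i terms) instead of A's rescan of the
-- # whole row for every gcd candidate (m modulo tests); zeros are divisible by
-- # everything, and the rare entries with |x| > mx are checked directly.
--
-- def _freq_table(row, mx):
--     freq = [0] * (mx + 1)
--     zeros = 0
--     big = []
--     for x in row:
--         a = -x if x < 0 else x
--         if a == 0:
--             zeros += 1
--         elif a <= mx:
--             freq[a] += 1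
--         else:
--             big.append(x)
--     return freq, zeros, big
--
-- def _count_multiples(freq, zeros, big, mx, i):
--     s = zeros
--     for v in range(i, mx + 1, i):
--         s += freq[v]
--     for x in big:
--         if x % i == 0:
--             s += 1
--     return s
--
-- def countCoprime(mat: List[List[int]]) -> int:
--     MOD = 1_000_000_007
--     mx = max(map(max, mat))
--     tables = [_freq_table(row, mx) for row in mat]
--     g = [0] * (mx + 1)
--     for i in range(mx, 0, -1):
--         res = 1
--         for freq, zeros, big in tables:
--             c = _count_multiples(freq, zeros, big, mx, i)
--             if c == 0:
--                 res = 0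
--                 break
--             res = res * c % MOD
--         for j in range(2 * i, mx + 1, i):
--             res -= g[j]
--         g[i] = res % MOD
--     return g[1]
-- ===== Notes on version B (the rewrite author's own statement) =====
-- stated objective: faster
-- what changed: A rescans every row element for every gcd candidate i (an O(mx*n*m) triple loop); B precomputes one frequency table of absolute values per row and counts the multiples of i by a sieve-style sum over i's multiples (mx/i terms, harmonic total O(n*mx*log mx)), checking only zeros and the rare |x| > mx entries directly.
-- outside the precondition, e.g. on countCoprime([]): A raises ValueError, B raises ValueError; on countCoprime([[2, 3], []]): A raises ValueError, B raises ValueError; on countCoprime([[0, -3], [-2, 0]]): A raises IndexError, B raises IndexError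
import Mathlib
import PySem

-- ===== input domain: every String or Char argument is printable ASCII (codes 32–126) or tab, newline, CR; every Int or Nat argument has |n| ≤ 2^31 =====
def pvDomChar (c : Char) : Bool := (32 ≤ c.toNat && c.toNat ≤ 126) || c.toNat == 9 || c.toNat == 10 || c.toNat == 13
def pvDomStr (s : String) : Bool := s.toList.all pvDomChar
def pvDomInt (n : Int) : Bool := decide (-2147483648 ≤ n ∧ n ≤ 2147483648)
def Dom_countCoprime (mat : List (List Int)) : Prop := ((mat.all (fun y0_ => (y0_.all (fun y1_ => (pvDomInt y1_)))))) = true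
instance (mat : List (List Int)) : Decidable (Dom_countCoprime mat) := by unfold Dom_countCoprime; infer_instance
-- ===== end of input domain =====

-- B keeps A's inclusion-exclusion over gcd values (and its break on a row without
-- multiples) but counts a row's multiples of i from a per-row frequency table of
-- absolute values summed sieve-style over i's multiples, instead of A's rescan of
-- the whole row per gcd candidate; zeros and |x| > mx entries are checked directly.


-- ===== PORT A =====
-- max(xs) for a list of ints; total form (Pre_ guarantees xs ≠ [])
def pyMaxA (xs : List Int) : Int := (PySem.List.max? xs (fun x => x)).getD 0

-- inner loop: cnt = number of x in row with x % i == 0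
def countDivA (row : List Int) (i : Int) : Int :=
  row.foldl (fun cnt x => if PySem.Int.mod x i = 0 then cnt + 1 else cnt) 0

-- the 'for row in mat' loop with its break-on-zero
def rowLoopA (rows : List (List Int)) (i : Int) (res : Int) : Int :=
  match rows with
  | [] => res
  | row :: rest =>
    let cnt := countDivA row i
    if cnt = 0 then 0
    else rowLoopA rest i (PySem.Int.mod (res * cnt) 1000000007)

-- one iteration of the outer 'for i in range(mx, 0, -1)' loop
def stepA (mat : List (List Int)) (mx : Int) (g : List Int) (i : Int) : List Int :=
  let res := rowLoopA mat i 1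
  let res2 := (PySem.List.pyRange i (mx + 1) i).foldl
    (fun r j => r - PySem.List.pyGetD g j 0) res
  PySem.List.pySetD g i (PySem.Int.mod res2 1000000007)

def countCoprime (mat : List (List Int)) : Int :=
  let mx := pyMaxA (mat.map pyMaxA)
  let g := (PySem.List.pyRange mx 0 (-1)).foldl (stepA mat mx)
    (List.replicate (mx + 1).toNat 0)
  PySem.List.pyGetD g 1 0  -- cnt_gcd[1]; index in range under Pre_ (some entry ≥ 1)

-- ===== PORT B =====
def pyMaxB (xs : List Int) : Int := (PySem.List.max? xs (fun x => x)).getD 0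

-- 'a = -x if x < 0 else x'
def pvAbsB (x : Int) : Int := if x < 0 then -x else x

-- body of the 'for x in row' loop of _freq_table: (freq, zeros, big) accumulator
def freqStepB (mx : Int) (t : List Int × Int × List Int) (x : Int)
    : List Int × Int × List Int :=
  let a := pvAbsB x
  if a = 0 then (t.1, t.2.1 + 1, t.2.2)
  else if a ≤ mx then
    (PySem.List.pySetD t.1 a (PySem.List.pyGetD t.1 a 0 + 1), t.2.1, t.2.2)
  else (t.1, t.2.1, t.2.2 ++ [x])

-- _freq_table(row, mx)
def freqTableB (mx : Int) (row : List Int) : List Int × Int × List Int :=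
  row.foldl (freqStepB mx) (List.replicate (mx + 1).toNat 0, 0, [])

-- _count_multiples(freq, zeros, big, mx, i)
def countMultB (freq : List Int) (zeros : Int) (big : List Int) (mx i : Int) : Int :=
  let s := (PySem.List.pyRange i (mx + 1) i).foldl
    (fun s v => s + PySem.List.pyGetD freq v 0) zeros
  big.foldl (fun s x => if PySem.Int.mod x i = 0 then s + 1 else s) s

-- B's 'for freq, zeros, big in tables' loop with its break-on-zero
def rowLoopB (tables : List (List Int × Int × List Int)) (mx i res : Int) : Int :=
  match tables with
  | [] => res
  | fp :: rest =>
    let c := countMultB fp.1 fp.2.1 fp.2.2 mx i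
    if c = 0 then 0
    else rowLoopB rest mx i (PySem.Int.mod (res * c) 1000000007)

-- one iteration of B's outer 'for i in range(mx, 0, -1)' loop
def stepB (tables : List (List Int × Int × List Int)) (mx : Int) (g : List Int) (i : Int)
    : List Int :=
  let res := rowLoopB tables mx i 1
  let res2 := (PySem.List.pyRange (2 * i) (mx + 1) i).foldl
    (fun r j => r - PySem.List.pyGetD g j 0) res
  PySem.List.pySetD g i (PySem.Int.mod res2 1000000007)

def countCoprime_alt (mat : List (List Int)) : Int :=
  let mx := pyMaxB (mat.map pyMaxB)
  let tables := mat.map (freqTableB mx)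
  let g := (PySem.List.pyRange mx 0 (-1)).foldl (stepB tables mx)
    (List.replicate (mx + 1).toNat 0)
  PySem.List.pyGetD g 1 0

-- ===== PRECONDITION & SPEC =====
-- A raises on an empty matrix and on an empty row (ValueError from max) and, when no
-- entry is ≥ 1, an IndexError on the final cnt_gcd[1]; exactly those inputs are excluded.
def Pre_countCoprime (mat : List (List Int)) : Prop :=
  mat ≠ [] ∧ (∀ row ∈ mat, row ≠ []) ∧ (∃ row ∈ mat, ∃ x ∈ row, 1 ≤ x)
instance (mat : List (List Int)) : Decidable (Pre_countCoprime mat) := by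
  unfold Pre_countCoprime; infer_instance

def pvWitness_countCoprime : List (List Int) := [[2, 3], [4, 5]]

def Spec_countCoprime (mat : List (List Int)) (out : Int) : Prop := out = countCoprime_alt mat
instance (mat : List (List Int)) (out : Int) : Decidable (Spec_countCoprime mat out) := by
  unfold Spec_countCoprime; infer_instance

-- ===== CLAIM (what is proved, stated in full; the proofs are below) =====
def Claim_equal_countCoprime : Prop := ∀ (mat : List (List Int)),
  Dom_countCoprime mat → Pre_countCoprime mat → Spec_countCoprime mat (countCoprime mat)

-- ===== LEMMAS AND PROOFS =====
theorem getD_set_eq (l : List Int) (n m : Nat) (v : Int) (hn : n < l.length) :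
    (l.set n v).getD m 0 = if m = n then v else l.getD m 0 := by
  simp only [List.getD, List.getElem?_set, hn, if_true]
  by_cases h : n = m
  · subst h; simp
  · simp [h, Ne.symm h]

theorem getD_replicate_zero (n m : Nat) : (List.replicate n (0:Int)).getD m 0 = 0 := by
  rcases lt_or_ge m n with h | h
  · exact List.getD_replicate 0 h
  · exact List.getD_eq_default _ _ (by simpa using h)

theorem pyRange_pos_eq_nil {a b s : Int} (hs : 0 < s) (h : b ≤ a) :
    PySem.List.pyRange a b s = [] := by
  rw [PySem.List.pyRange_of_pos a b hs]
  simp [not_lt.mpr h]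

theorem pyRange_pos_cons {a b s : Int} (hs : 0 < s) (h : a < b) :
    PySem.List.pyRange a b s = a :: PySem.List.pyRange (a + s) b s := by
  rw [PySem.List.pyRange_of_pos a b hs, PySem.List.pyRange_of_pos (a+s) b hs]
  have hs0 : s ≠ 0 := by omega
  have hcnt : (b - a + s - 1) / s = (b - (a+s) + s - 1) / s + 1 := by
    have he : b - a + s - 1 = (b - (a+s) + s - 1) + 1 * s := by ring
    rw [he, Int.add_mul_ediv_right _ _ hs0]
  by_cases h2 : a + s < b
  · simp only [h, if_true, h2, if_true, hcnt]
    have hnn : 0 ≤ (b - (a+s) + s - 1) / s := by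
      apply Int.ediv_nonneg _ (le_of_lt hs); omega
    rw [show ((b - (a+s) + s - 1) / s + 1).toNat = ((b - (a+s) + s - 1) / s).toNat + 1 by omega]
    rw [List.range_succ_eq_map]
    simp only [List.map_cons, List.map_map]
    congr 1
    · simp
    · apply List.map_congr_left
      intro k _
      simp [Function.comp, Nat.succ_eq_add_one]
      ring
  · have hz : (b - (a+s) + s - 1) / s = 0 := by
      apply Int.ediv_eq_zero_of_lt <;> omega
    simp only [h, if_true, not_lt.mpr (not_lt.mp h2), if_false, hcnt, hz]
    norm_num

theorem countDivA_eq (row : List Int) (i : Int) :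
    countDivA row i = (row.countP (fun x => decide (i ∣ x)) : Int) := by
  unfold countDivA
  rw [PySem.List.foldl_ite_add_one (fun x => PySem.Int.mod x i = 0) row 0]
  rw [List.countP_congr (q := fun x => decide (i ∣ x)) (fun x _ => by
    simp [PySem.Int.mod_eq_zero_iff_dvd])]
  ring

theorem pvAbsB_nonneg (x : Int) : 0 ≤ pvAbsB x := by unfold pvAbsB; split <;> omega

theorem dvd_pvAbsB (i x : Int) : i ∣ pvAbsB x ↔ i ∣ x := by
  unfold pvAbsB; split
  · exact dvd_neg
  · exact Iff.rfl

theorem pvAbsB_eq_zero (x : Int) : pvAbsB x = 0 ↔ x = 0 := by unfold pvAbsB; split <;> omega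

-- three-way split of a divisibility count: |x| in [1,mx] / x = 0 / |x| > mx
theorem countP_three_split (row : List Int) (i mx : Int) (hmx : 0 ≤ mx) :
    row.countP (fun x => decide (i ∣ x)) =
      row.countP (fun x => decide (1 ≤ pvAbsB x ∧ pvAbsB x ≤ mx ∧ i ∣ x))
      + row.countP (fun x => x == 0)
      + row.countP (fun x => decide (mx < pvAbsB x ∧ i ∣ x)) := by
  induction row with
  | nil => rfl
  | cons x t ih =>
    have ha := pvAbsB_nonneg x
    have key : ((if i ∣ x then 1 else 0) : Nat) =
        (if 1 ≤ pvAbsB x ∧ pvAbsB x ≤ mx ∧ i ∣ x then 1 else 0)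
        + (if x = 0 then 1 else 0)
        + (if mx < pvAbsB x ∧ i ∣ x then 1 else 0) := by
      by_cases h0 : x = 0
      · subst h0
        have : pvAbsB 0 = 0 := by unfold pvAbsB; norm_num
        simp [this, dvd_zero, hmx]
      · have h1 : 1 ≤ pvAbsB x := by
          rcases lt_or_eq_of_le ha with h | h
          · omega
          · exact absurd ((pvAbsB_eq_zero x).mp h.symm) h0
        by_cases hd : i ∣ x <;> by_cases hm : pvAbsB x ≤ mx <;>
          simp [hd, hm, h0, h1]
    simp only [List.countP_cons, ih, decide_eq_true_eq, beq_iff_eq]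
    omega

-- peel the first multiple off the banded count
theorem countP_peel (row : List Int) (i a mx : Int) (hi : 0 < i) (ha : i ∣ a) (_ha0 : 0 < a)
    (ham : a ≤ mx) :
    row.countP (fun x => decide (a ≤ pvAbsB x ∧ pvAbsB x ≤ mx ∧ i ∣ x)) =
      row.countP (fun x => pvAbsB x == a)
      + row.countP (fun x => decide (a + i ≤ pvAbsB x ∧ pvAbsB x ≤ mx ∧ i ∣ x)) := by
  induction row with
  | nil => rfl
  | cons x t ih =>
    have key : ((if a ≤ pvAbsB x ∧ pvAbsB x ≤ mx ∧ i ∣ x then 1 else 0) : Nat) =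
        (if pvAbsB x = a then 1 else 0)
        + (if a + i ≤ pvAbsB x ∧ pvAbsB x ≤ mx ∧ i ∣ x then 1 else 0) := by
      by_cases hxa : pvAbsB x = a
      · have hdx : i ∣ x := (dvd_pvAbsB i x).mp (hxa ▸ ha)
        simp [hxa, ham, hdx, hi]
      · have hiff : (a ≤ pvAbsB x ∧ pvAbsB x ≤ mx ∧ i ∣ x)
            ↔ (a + i ≤ pvAbsB x ∧ pvAbsB x ≤ mx ∧ i ∣ x) := by
          constructor
          · rintro ⟨h1, h2, h3⟩
            refine ⟨?_, h2, h3⟩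
            have hd : i ∣ pvAbsB x - a := Int.dvd_sub ((dvd_pvAbsB i x).mpr h3) ha
            rcases eq_or_lt_of_le h1 with he | hlt
            · exact absurd he.symm hxa
            · have := Int.le_of_dvd (by omega) hd
              omega
          · rintro ⟨h1, h2, h3⟩; exact ⟨by omega, h2, h3⟩
        simp [hxa, hiff]
    simp only [List.countP_cons, ih, decide_eq_true_eq, beq_iff_eq]
    omega

theorem freq_fst (mx : Int) (row : List Int) : ∀ (c : List Int) (z : Int) (l : List Int),
    c.length = (mx + 1).toNat → ∀ v : Int, 1 ≤ v → v ≤ mx →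
    (row.foldl (freqStepB mx) (c, z, l)).1.getD v.toNat 0
      = c.getD v.toNat 0 + (row.countP (fun x => pvAbsB x == v) : Int) := by
  induction row with
  | nil => intro c z l _ v _ _; simp
  | cons x t ih =>
    intro c z l hlen v hv hvm
    have ha := pvAbsB_nonneg x
    simp only [List.foldl_cons, freqStepB]
    by_cases h0 : pvAbsB x = 0
    · simp only [h0, if_true]
      rw [ih c (z+1) l hlen v hv hvm]
      have : ¬ (pvAbsB x = v) := by omega
      simp [this]
    · by_cases hm : pvAbsB x ≤ mx
      · simp only [h0, if_false, hm, if_true]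
        have hxi : (pvAbsB x).toNat < c.length := by rw [hlen]; omega
        rw [PySem.List.pySetD_of_nonneg _ _ (by omega), PySem.List.pyGetD_of_nonneg _ _ (by omega)]
        rw [ih _ z l (by simp [hlen]) v hv hvm]
        rw [getD_set_eq _ _ _ _ hxi]
        by_cases hxv : pvAbsB x = v
        · rw [if_pos (by omega)]
          simp [hxv]
          omega
        · rw [if_neg (by omega)]
          simp [hxv]
      · simp only [h0, if_false, hm, if_false]
        rw [ih c z (l ++ [x]) hlen v hv hvm]
        have : ¬ (pvAbsB x = v) := by omega
        simp [this]

theorem freq_snd (mx : Int) (row : List Int) : ∀ (c : List Int) (z : Int) (l : List Int),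
    (row.foldl (freqStepB mx) (c, z, l)).2.1
      = z + (row.countP (fun x => x == 0) : Int) := by
  induction row with
  | nil => intro c z l; simp
  | cons x t ih =>
    intro c z l
    simp only [List.foldl_cons, freqStepB]
    by_cases h0 : pvAbsB x = 0
    · have hx0 : x = 0 := (pvAbsB_eq_zero x).mp h0
      simp only [h0, if_true]
      rw [ih]
      simp [hx0]
      ring
    · have hx0 : ¬ (x = 0) := fun h => h0 ((pvAbsB_eq_zero x).mpr h)
      by_cases hm : pvAbsB x ≤ mx <;>
        simp only [h0, if_false, hm, if_true, if_false] <;>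
        rw [ih] <;> simp [hx0]

theorem freq_trd (mx : Int) (row : List Int) (hmx : 0 ≤ mx) :
    ∀ (c : List Int) (z : Int) (l : List Int),
    (row.foldl (freqStepB mx) (c, z, l)).2.2
      = l ++ row.filter (fun x => decide (mx < pvAbsB x)) := by
  induction row with
  | nil => intro c z l; simp
  | cons x t ih =>
    intro c z l
    have ha := pvAbsB_nonneg x
    simp only [List.foldl_cons, freqStepB, List.filter_cons]
    by_cases h0 : pvAbsB x = 0
    · have hnm : ¬ (mx < pvAbsB x) := by omega
      simp only [h0, if_true]
      rw [ih]
      simp [hmx]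
    · by_cases hm : pvAbsB x ≤ mx
      · have hnm : ¬ (mx < pvAbsB x) := by omega
        simp only [h0, if_false, hm, if_true]
        rw [ih]
        simp [hnm]
      · have hnm : mx < pvAbsB x := by omega
        simp only [h0, if_false, hm, if_false]
        rw [ih]
        simp [hnm]

theorem sieve_sum (i mx : Int) (hi : 0 < i) (row : List Int) (freq : List Int)
    (hf : ∀ v : Int, 1 ≤ v → v ≤ mx →
      freq.getD v.toNat 0 = (row.countP (fun x => pvAbsB x == v) : Int)) :
    ∀ (n : Nat) (a : Int), (mx + 1 - a).toNat ≤ n → 0 < a → i ∣ a → ∀ (s : Int),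
    (PySem.List.pyRange a (mx + 1) i).foldl (fun s v => s + PySem.List.pyGetD freq v 0) s
      = s + (row.countP (fun x => decide (a ≤ pvAbsB x ∧ pvAbsB x ≤ mx ∧ i ∣ x)) : Int) := by
  intro n
  induction n with
  | zero =>
    intro a hn ha hd s
    have hba : mx + 1 ≤ a := by omega
    rw [pyRange_pos_eq_nil hi hba]
    have hz : row.countP (fun x => decide (a ≤ pvAbsB x ∧ pvAbsB x ≤ mx ∧ i ∣ x)) = 0 := by
      rw [List.countP_eq_zero]
      intro x _
      simp only [decide_eq_true_eq, not_and]
      intro h1 h2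
      omega
    rw [hz]
    simp
  | succ n ihn =>
    intro a hn ha hd s
    by_cases hba : mx + 1 ≤ a
    · rw [pyRange_pos_eq_nil hi hba]
      have hz : row.countP (fun x => decide (a ≤ pvAbsB x ∧ pvAbsB x ≤ mx ∧ i ∣ x)) = 0 := by
        rw [List.countP_eq_zero]
        intro x _
        simp only [decide_eq_true_eq, not_and]
        intro h1 h2
        omega
      rw [hz]
      simp
    · rw [not_le] at hba
      rw [pyRange_pos_cons hi hba]
      simp only [List.foldl_cons]
      rw [PySem.List.pyGetD_of_nonneg _ _ (by omega)]
      rw [hf a (by omega) (by omega)]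
      rw [ihn (a + i) (by omega) (by omega) (dvd_add hd (dvd_refl i)) _]
      rw [countP_peel row i a mx hi hd (by omega) (by omega)]
      push_cast
      ring

theorem countMult_eq (row : List Int) (mx i : Int) (hi : 0 < i) (him : i ≤ mx)
    (freq : List Int) (zeros : Int) (big : List Int)
    (hf : ∀ v : Int, 1 ≤ v → v ≤ mx →
      freq.getD v.toNat 0 = (row.countP (fun x => pvAbsB x == v) : Int))
    (hz : zeros = (row.countP (fun x => x == 0) : Int))
    (hb : big = row.filter (fun x => decide (mx < pvAbsB x))) :
    countMultB freq zeros big mx i = countDivA row i := by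
  unfold countMultB
  rw [sieve_sum i mx hi row freq hf (mx + 1 - i).toNat i (by omega) hi (dvd_refl i) zeros]
  rw [PySem.List.foldl_ite_add_one (fun x => PySem.Int.mod x i = 0) _ _]
  rw [countDivA_eq, countP_three_split row i mx (by omega)]
  rw [hb, List.countP_filter, hz]
  have h1 : row.countP (fun x => decide (i ≤ pvAbsB x ∧ pvAbsB x ≤ mx ∧ i ∣ x)) =
      row.countP (fun x => decide (1 ≤ pvAbsB x ∧ pvAbsB x ≤ mx ∧ i ∣ x)) := by
    apply List.countP_congr
    intro x _
    simp only [decide_eq_true_eq]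
    constructor
    · rintro ⟨ha, hb', hc⟩; exact ⟨by omega, hb', hc⟩
    · rintro ⟨ha, hb', hc⟩
      exact ⟨Int.le_of_dvd (by omega) ((dvd_pvAbsB i x).mpr hc), hb', hc⟩
  have h2 : row.countP (fun x => decide (PySem.Int.mod x i = 0) && decide (mx < pvAbsB x)) =
      row.countP (fun x => decide (mx < pvAbsB x ∧ i ∣ x)) := by
    apply List.countP_congr
    intro x _
    simp [PySem.Int.mod_eq_zero_iff_dvd, and_comm]
  rw [h1, h2]
  push_cast
  ring

theorem rowLoop_eq (mx : Int) (hmx : 0 < mx) (i : Int) (hi : 0 < i) (him : i ≤ mx) :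
    ∀ (rows : List (List Int)) (res : Int),
    rowLoopB (rows.map (freqTableB mx)) mx i res = rowLoopA rows i res := by
  intro rows
  induction rows with
  | nil => intro res; rfl
  | cons row t ih =>
    intro res
    simp only [List.map_cons, rowLoopB, rowLoopA]
    have hc : countMultB (freqTableB mx row).1 (freqTableB mx row).2.1
        (freqTableB mx row).2.2 mx i = countDivA row i := by
      apply countMult_eq row mx i hi him
      · intro v hv hvm
        unfold freqTableB
        rw [freq_fst mx row _ _ _ (by simp) v hv hvm, getD_replicate_zero]
        ring
      · unfold freqTableB
        rw [freq_snd mx row]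
        ring
      · unfold freqTableB
        rw [freq_trd mx row (by omega)]
        simp
    rw [hc]
    by_cases h : countDivA row i = 0
    · simp [h]
    · simp only [h, if_false]
      exact ih _

theorem step_eq (mat : List (List Int)) (mx i : Int) (hmx : 0 < mx)
    (hi : 0 < i) (him : i ≤ mx)
    (g : List Int) (hg : g.getD i.toNat 0 = 0) :
    stepA mat mx g i = stepB (mat.map (freqTableB mx)) mx g i := by
  simp only [stepA, stepB]
  rw [rowLoop_eq mx hmx i hi him mat 1]
  rw [pyRange_pos_cons hi (by omega)]
  simp only [List.foldl_cons]
  rw [PySem.List.pyGetD_of_nonneg _ _ (by omega), hg, sub_zero]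
  rw [show (2 * i) = i + i by ring]

theorem outer_eq (mat : List (List Int)) (mx : Int) (hmx : 0 < mx) :
    ∀ (k : Nat) (i : Int) (g : List Int), i ≤ (k : Int) → i ≤ mx →
    (∀ j : Int, 1 ≤ j → j ≤ i → g.getD j.toNat 0 = 0) →
    (PySem.List.pyRange i 0 (-1)).foldl (stepA mat mx) g
      = (PySem.List.pyRange i 0 (-1)).foldl (stepB (mat.map (freqTableB mx)) mx) g := by
  intro k
  induction k with
  | zero =>
    intro i g hk _ _
    rw [PySem.List.pyRange_neg_one_eq_nil (by omega)]
    rfl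
  | succ k ih =>
    intro i g hk him hz
    by_cases hi : 0 < i
    · rw [PySem.List.pyRange_neg_one_cons (by omega : (0:Int) < i)]
      simp only [List.foldl_cons]
      rw [step_eq mat mx i hmx hi him g (hz i (by omega) (by omega))]
      have hg' : ∀ j : Int, 1 ≤ j → j ≤ i - 1 →
          (stepB (mat.map (freqTableB mx)) mx g i).getD j.toNat 0 = 0 := by
        intro j hj1 hj2
        simp only [stepB]
        rw [PySem.List.pySetD_of_nonneg _ _ (by omega)]
        rcases lt_or_ge i.toNat g.length with hlt | hge
        · rw [getD_set_eq _ _ _ _ hlt, if_neg (by omega)]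
          exact hz j hj1 (by omega)
        · rw [List.set_eq_of_length_le (by omega)]
          exact hz j hj1 (by omega)
      exact ih (i - 1) _ (by omega) (by omega) hg'
    · rw [PySem.List.pyRange_neg_one_eq_nil (by omega)]
      rfl

theorem pyMaxA_ge (xs : List Int) (h : xs ≠ []) : ∀ x ∈ xs, x ≤ pyMaxA xs := by
  match xs with
  | [] => exact absurd rfl h
  | a :: t =>
    intro x hx
    unfold pyMaxA
    rw [PySem.List.max?_id_cons]
    rcases hx with _ | hx
    · exact (PySem.List.le_foldl_max t a).1
    · exact (PySem.List.le_foldl_max t a).2 x (by assumption)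

theorem countCoprime_main (mat : List (List Int))
    (h1 : mat ≠ []) (h2 : ∀ row ∈ mat, row ≠ [])
    (h3 : ∃ row ∈ mat, ∃ x ∈ row, 1 ≤ x) :
    countCoprime mat = countCoprime_alt mat := by
  have hBA : pyMaxB = pyMaxA := rfl
  simp only [countCoprime, countCoprime_alt, hBA]
  set mx := pyMaxA (mat.map pyMaxA) with hmxdef
  have hmx : 1 ≤ mx := by
    obtain ⟨row, hrow, x, hx, h1x⟩ := h3
    have h4 : pyMaxA row ≤ mx := by
      apply pyMaxA_ge (mat.map pyMaxA) (by simp [h1])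
      exact List.mem_map_of_mem hrow
    exact le_trans (le_trans h1x (pyMaxA_ge row (h2 row hrow) x hx)) h4
  rw [outer_eq mat mx (by omega) mx.toNat mx (List.replicate (mx + 1).toNat 0)
      (by omega) (le_refl mx) (fun j hj1 hj2 => getD_replicate_zero _ _)]

-- ===== VERDICT (by name: the statement is the Claim_ definition above) =====
theorem countCoprime_spec : Claim_equal_countCoprime := by
  intro mat _ hpre
  unfold Spec_countCoprime
  obtain ⟨h1, h2, h3⟩ := hpre
  exact countCoprime_main mat h1 h2 h3
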